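-- pv_equiv track=rewrite | github.com/sungw00ng/solved | 오답노트/공원/100점.py | solution
-- ===== SOURCE A (Python) =====
-- def solution(mats, park):
--     answer = -1
--
--     #"-1"만 1로 보고, 나머지는 0 처리
--     board = [
--         [1 if x == "-1" else 0 for x in row]
--         for row in park
--     ]
--
--     rows = len(board)
--     cols = len(board[0])
--     dp = [[0]*cols for _ in range(rows)]
--
--     MatSize = 0
--
--     for i in range(rows):
--         for j in range(cols):
--             if board[i][j] == 1:
--                 #n=1
--                 if i == 0 or j == 0:
--                     dp[i][j] = 1
--                 #n>=2
--                 else: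
--                     dp[i][j] = min(dp[i-1][j],dp[i][j-1],dp[i-1][j-1]) + 1
--                 MatSize = max(MatSize, dp[i][j])
--
--     #내림차순
--     mats=sorted(mats,reverse=True)
--
--     #결과비교
--     for i in range(len(mats)):
--         if(mats[i]<=MatSize):
--             answer=mats[i]
--             break
--
--     return answer
-- ===== SOURCE B (Python) =====
-- def solution(mats, park):
--     rows = len(park)
--     cols = len(park[0])
--
--     # prefix sums: pre[i][j] = number of "-1" cells in park[0:i][0:j]
--     pre = [[0] * (cols + 1) for _ in range(rows + 1)]
--     for i in range(rows):
--         for j in range(cols):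
--             pre[i + 1][j + 1] = (pre[i + 1][j] + pre[i][j + 1] - pre[i][j]
--                                  + (1 if park[i][j] == "-1" else 0))
--
--     def feasible(s):
--         return any(pre[a + s][b + s] - pre[a + s][b] - pre[a][b + s] + pre[a][b] == s * s
--                    for a in range(rows - s + 1) for b in range(cols - s + 1))
--
--     # binary search for the largest side s with a fully-empty s x s window
--     lo, hi = 0, min(rows, cols)
--     while lo < hi:
--         mid = (lo + hi + 1) // 2
--         if feasible(mid):
--             lo = mid
--         else:
--             hi = mid - 1
--
--     return max((m for m in mats if m <= lo), default=-1)
-- ===== Notes on version B (the rewrite author's own statement) =====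
-- stated objective: alternative
-- what changed: B drops the maximal-square DP table entirely: it builds a 2-D prefix-sum table of empty cells, binary-searches the largest side s for which some s-by-s window has prefix-sum s*s (i.e. is fully empty), and replaces A's sort-then-first-match answer selection with max of the mats filtered to be at most that side (default -1).
import Mathlib
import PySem

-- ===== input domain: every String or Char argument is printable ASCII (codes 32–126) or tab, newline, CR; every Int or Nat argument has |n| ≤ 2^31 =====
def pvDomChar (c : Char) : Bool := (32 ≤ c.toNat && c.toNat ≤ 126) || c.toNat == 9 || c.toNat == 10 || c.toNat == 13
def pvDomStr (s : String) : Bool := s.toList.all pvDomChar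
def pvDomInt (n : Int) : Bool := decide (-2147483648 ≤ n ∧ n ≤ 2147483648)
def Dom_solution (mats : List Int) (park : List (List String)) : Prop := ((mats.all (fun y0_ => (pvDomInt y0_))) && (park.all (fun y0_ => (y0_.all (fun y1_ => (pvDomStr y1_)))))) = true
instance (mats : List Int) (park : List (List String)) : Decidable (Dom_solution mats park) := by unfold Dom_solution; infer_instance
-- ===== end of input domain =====

-- B replaces the maximal-square DP with a 2-D prefix-sum table of empty cells
-- plus a binary search for the largest side s such that some s×s window sums to
-- s*s (alternative algorithm, not claimed faster); equivalence of the RETURN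
-- value is proved on Pre_ (inputs where Python A does not raise).

-- ===== PORT A =====
-- A-side helper: the 'for i in range(len(mats)): if mats[i] <= MatSize: answer = mats[i]; break' loop
def firstLEA : List Int → Int → Int
  | [], _ => -1
  | m :: rest, k => if m ≤ k then m else firstLEA rest k

def solution (mats : List Int) (park : List (List String)) : Int :=
  let board : List (List Int) :=
    park.map (fun row => row.map (fun x => if x == "-1" then (1 : Int) else 0))
  let rows : Int := (board.length : Int)
  -- board[0]: Pre_ guarantees park ≠ [], so headD is exact
  let cols : Int := ((board.headD []).length : Int)
  let dp0 : List (List Int) := List.replicate rows.toNat (List.replicate cols.toNat (0 : Int))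
  -- indices below are nonnegative and in range under Pre_, so getD/set/toNat are exact
  let st :=
    (PySem.List.pyRange 0 rows 1).foldl (fun st i =>
      (PySem.List.pyRange 0 cols 1).foldl (fun st j =>
        let dp := st.1
        let ms := st.2
        if ((board.getD i.toNat []).getD j.toNat 0) == 1 then
          let v : Int :=
            if i == 0 || j == 0 then 1
            else min (min ((dp.getD (i - 1).toNat []).getD j.toNat 0)
                         ((dp.getD i.toNat []).getD (j - 1).toNat 0))
                     ((dp.getD (i - 1).toNat []).getD (j - 1).toNat 0) + 1
          (dp.set i.toNat ((dp.getD i.toNat []).set j.toNat v), max ms v)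
        else st) st) (dp0, (0 : Int))
  firstLEA (PySem.List.sorted mats (fun x => x) true) st.2

-- ===== PORT B =====
-- B-side helper: any(pre[a+s][b+s] - pre[a+s][b] - pre[a][b+s] + pre[a][b] == s*s for ...)
def feasibleB (pre : List (List Int)) (rows cols s : Int) : Bool :=
  (PySem.List.pyRange 0 (rows - s + 1) 1).any (fun a =>
    (PySem.List.pyRange 0 (cols - s + 1) 1).any (fun b =>
      ((pre.getD (a + s).toNat []).getD (b + s).toNat 0
        - (pre.getD (a + s).toNat []).getD b.toNat 0
        - (pre.getD a.toNat []).getD (b + s).toNat 0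
        + (pre.getD a.toNat []).getD b.toNat 0) == s * s))

-- B-side helper: the 'while lo < hi: mid = (lo+hi+1)//2; ...' binary search
def bsearchB (pre : List (List Int)) (rows cols lo hi : Int) : Int :=
  if h : lo < hi then
    let mid := PySem.Int.floordiv (lo + hi + 1) 2
    if feasibleB pre rows cols mid
    then bsearchB pre rows cols mid hi
    else bsearchB pre rows cols lo (mid - 1)
  else lo
  termination_by (hi - lo).toNat
  decreasing_by
  · have hb := PySem.Int.floordiv_two_mid_bounds (lo := lo + 1) (hi := hi) (by omega)
    have e : lo + 1 + hi = lo + hi + 1 := by omega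
    rw [e] at hb
    omega
  · have hb := PySem.Int.floordiv_two_mid_bounds (lo := lo + 1) (hi := hi) (by omega)
    have e : lo + 1 + hi = lo + hi + 1 := by omega
    rw [e] at hb
    omega

def solution_alt (mats : List Int) (park : List (List String)) : Int :=
  let rows : Int := (park.length : Int)
  -- park[0]: Pre_ guarantees park ≠ [], so headD is exact
  let cols : Int := ((park.headD []).length : Int)
  let pre0 : List (List Int) :=
    List.replicate (rows + 1).toNat (List.replicate (cols + 1).toNat (0 : Int))
  -- indices below are nonnegative and in range under Pre_, so getD/set/toNat are exact
  let pre :=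
    (PySem.List.pyRange 0 rows 1).foldl (fun t i =>
      (PySem.List.pyRange 0 cols 1).foldl (fun t j =>
        t.set (i + 1).toNat ((t.getD (i + 1).toNat []).set (j + 1).toNat
          ((t.getD (i + 1).toNat []).getD j.toNat 0
            + (t.getD i.toNat []).getD (j + 1).toNat 0
            - (t.getD i.toNat []).getD j.toNat 0
            + (if (park.getD i.toNat []).getD j.toNat "" == "-1" then (1 : Int) else 0)))) t)
      pre0
  let maxside := bsearchB pre rows cols 0 (min rows cols)
  match mats.filter (fun m => decide (m ≤ maxside)) with
  | [] => -1
  | h :: t => t.foldl max h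

-- ===== PRECONDITION & SPEC =====
-- Pre_ excludes exactly the inputs where Python A raises an IndexError:
-- an empty park (park[0]) and parks whose some row is shorter than the first row
-- (board[i][j] for j < len(park[0])).
def Pre_solution (mats : List Int) (park : List (List String)) : Prop :=
  park ≠ [] ∧ ∀ row ∈ park, (park.headD []).length ≤ row.length
instance (mats : List Int) (park : List (List String)) : Decidable (Pre_solution mats park) := by
  unfold Pre_solution; infer_instance

def pvWitness_solution : List Int × List (List String) :=
  ([2, 1], [["-1", "0"], ["-1", "-1"]])

def Spec_solution (mats : List Int) (park : List (List String)) (out : Int) : Prop := out = solution_alt mats park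
instance (mats : List Int) (park : List (List String)) (out : Int) : Decidable (Spec_solution mats park out) := by unfold Spec_solution; infer_instance

-- ===== CLAIM (what is proved, stated in full; the proofs are below) =====
def Claim_equal_solution : Prop := ∀ (mats : List Int) (park : List (List String)), Dom_solution mats park → Pre_solution mats park → Spec_solution mats park (solution mats park)

-- ===== LEMMAS AND PROOFS =====

-- ---- shared mathematical model ----

def empP (P : List (List String)) (i j : Nat) : Bool := ((P.getD i []).getD j "") == "-1"

def dP (P : List (List String)) : Nat → Nat → Nat
  | 0, j => if empP P 0 j then 1 else 0
  | (i+1), 0 => if empP P (i+1) 0 then 1 else 0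
  | (i+1), (j+1) =>
      if empP P (i+1) (j+1)
      then min (min (dP P i (j+1)) (dP P (i+1) j)) (dP P i j) + 1
      else 0
  termination_by i j => i + j
  decreasing_by all_goals omega

lemma dP_eq (P : List (List String)) (i j : Nat) :
    dP P i j = if empP P i j
      then (if i = 0 ∨ j = 0 then 1
            else min (min (dP P (i-1) j) (dP P i (j-1))) (dP P (i-1) (j-1)) + 1)
      else 0 := by
  rcases i with _ | i <;> rcases j with _ | j <;> simp [dP]

def dpAt (P : List (List String)) (R C i j : Nat) : List (List Int) :=
  (List.range R).map fun r => (List.range C).map fun c =>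
    if r < i ∨ (r = i ∧ c < j) then (dP P r c : Int) else 0

def cb (C i k : Nat) : List (Nat × Nat) :=
  ((List.range i).flatMap fun r => (List.range C).map fun c => (r, c))
    ++ (List.range k).map fun c => (i, c)

def msAt (P : List (List String)) (C i k : Nat) : Int :=
  (cb C i k).foldl (fun a p => max a ((dP P p.1 p.2 : Int))) 0

def allEmpP (P : List (List String)) (a b s : Nat) : Prop :=
  ∀ x, x < s → ∀ y, y < s → empP P (a + x) (b + y) = true

def maxFilter (M : Int) (l : List Int) : Int :=
  match l.filter (fun m => decide (m ≤ M)) with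
  | [] => -1
  | h :: t => t.foldl max h

lemma dP_ge_iff_aux (P : List (List String)) :
    ∀ n i j s, i + j = n → 1 ≤ s →
      (s ≤ dP P i j ↔ s ≤ i + 1 ∧ s ≤ j + 1 ∧ allEmpP P (i + 1 - s) (j + 1 - s) s) := by
  intro n
  induction n using Nat.strong_induction_on with
  | _ n ih =>
  intro i j s hn hs
  rcases i with _ | i
  · -- i = 0
    by_cases h : empP P 0 j = true
    · simp only [dP, h, if_true]
      constructor
      · intro h1
        have hs1 : s = 1 := by omega
        subst hs1
        refine ⟨le_refl _, by omega, ?_⟩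
        intro x hx y hy
        have hx0 : x = 0 := by omega
        have hy0 : y = 0 := by omega
        subst hx0; subst hy0
        have e1 : 0 + 1 - 1 + 0 = 0 := by omega
        have e2 : j + 1 - 1 + 0 = j := by omega
        rw [e1, e2]; exact h
      · rintro ⟨h1, _, _⟩; exact h1
    · have hd : dP P 0 j = 0 := by simp [dP, h]
      rw [hd]
      constructor
      · intro h1; omega
      · rintro ⟨h1, h2, hA⟩
        have hs1 : s = 1 := by omega
        subst hs1
        have := hA 0 (by omega) 0 (by omega)
        have e1 : 0 + 1 - 1 + 0 = 0 := by omega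
        have e2 : j + 1 - 1 + 0 = j := by omega
        rw [e1, e2] at this
        simp [this] at h
  · rcases j with _ | j
    · -- j = 0
      by_cases h : empP P (i+1) 0 = true
      · simp only [dP, h, if_true]
        constructor
        · intro h1
          have hs1 : s = 1 := by omega
          subst hs1
          refine ⟨by omega, le_refl _, ?_⟩
          intro x hx y hy
          have hx0 : x = 0 := by omega
          have hy0 : y = 0 := by omega
          subst hx0; subst hy0
          have e1 : i + 1 + 1 - 1 + 0 = i + 1 := by omega
          have e2 : 0 + 1 - 1 + 0 = 0 := by omega
          rw [e1, e2]; exact h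
        · rintro ⟨_, h2, _⟩; exact h2
      · have hd : dP P (i+1) 0 = 0 := by simp [dP, h]
        rw [hd]
        constructor
        · intro h1; omega
        · rintro ⟨h1, h2, hA⟩
          have hs1 : s = 1 := by omega
          subst hs1
          have := hA 0 (by omega) 0 (by omega)
          have e1 : i + 1 + 1 - 1 + 0 = i + 1 := by omega
          have e2 : 0 + 1 - 1 + 0 = 0 := by omega
          rw [e1, e2] at this
          simp [this] at h
    · -- i+1, j+1
      by_cases h : empP P (i+1) (j+1) = true
      · rcases s with _ | t
        · omega
        rcases t with _ | t
        · -- s = 1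
          simp only [dP, h, if_true]
          constructor
          · intro _
            refine ⟨by omega, by omega, ?_⟩
            intro x hx y hy
            have hx0 : x = 0 := by omega
            have hy0 : y = 0 := by omega
            subst hx0; subst hy0
            have e1 : i + 1 + 1 - 1 + 0 = i + 1 := by omega
            have e2 : j + 1 + 1 - 1 + 0 = j + 1 := by omega
            rw [e1, e2]; exact h
          · intro _; omega
        · -- s = t+2; write t' := t+1
          have ih1 := ih (i + (j+1)) (by omega) i (j+1) (t+1) rfl (by omega)
          have ih2 := ih ((i+1) + j) (by omega) (i+1) j (t+1) rfl (by omega)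
          have ih3 := ih (i + j) (by omega) i j (t+1) rfl (by omega)
          simp only [dP, h, if_true]
          have hstep : (t+2 ≤ min (min (dP P i (j+1)) (dP P (i+1) j)) (dP P i j) + 1)
              ↔ (t+1 ≤ dP P i (j+1) ∧ t+1 ≤ dP P (i+1) j ∧ t+1 ≤ dP P i j) := by
            constructor
            · intro hm
              have h1 : t + 1 ≤ min (min (dP P i (j+1)) (dP P (i+1) j)) (dP P i j) := by omega
              simp only [Nat.le_min] at h1
              exact ⟨h1.1.1, h1.1.2, h1.2⟩
            · intro ⟨a1, a2, a3⟩
              have : t + 1 ≤ min (min (dP P i (j+1)) (dP P (i+1) j)) (dP P i j) := by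
                simp only [Nat.le_min]; exact ⟨⟨a1, a2⟩, a3⟩
              omega
          rw [hstep, ih1, ih2, ih3]
          constructor
          · rintro ⟨⟨b1i, b1j, hA1⟩, ⟨b2i, b2j, hA2⟩, ⟨b3i, b3j, hA3⟩⟩
            refine ⟨by omega, by omega, ?_⟩
            intro x hx y hy
            by_cases hxt : x = t + 1
            · by_cases hyt : y = t + 1
              · subst hxt; subst hyt
                have e1 : i + 1 + 1 - (t+2) + (t+1) = i + 1 := by omega
                have e2 : j + 1 + 1 - (t+2) + (t+1) = j + 1 := by omega
                rw [e1, e2]; exact h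
              · -- x = t+1, y < t+1 : bottom strip, use hA2 (base (i+2-(t+1), j+1-(t+1)))
                subst hxt
                have := hA2 t (by omega) y (by omega)
                have e1 : i + 1 + 1 - (t+2) + (t+1) = i + 1 + 1 - (t+1) + t := by omega
                have e2 : j + 1 + 1 - (t+2) + y = j + 1 - (t+1) + y := by omega
                rw [e1, e2]; exact this
            · by_cases hyt : y = t + 1
              · subst hyt
                have := hA1 x (by omega) t (by omega)
                have e1 : i + 1 + 1 - (t+2) + x = i + 1 - (t+1) + x := by omega
                have e2 : j + 1 + 1 - (t+2) + (t+1) = j + 1 + 1 - (t+1) + t := by omega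
                rw [e1, e2]; exact this
              · have := hA3 x (by omega) y (by omega)
                have e1 : i + 1 + 1 - (t+2) + x = i + 1 - (t+1) + x := by omega
                have e2 : j + 1 + 1 - (t+2) + y = j + 1 - (t+1) + y := by omega
                rw [e1, e2]; exact this
          · rintro ⟨hb1, hb2, hA⟩
            refine ⟨⟨by omega, by omega, ?_⟩, ⟨by omega, by omega, ?_⟩, ⟨by omega, by omega, ?_⟩⟩
            · -- allEmpP (i+1-(t+1)) (j+2-(t+1)) (t+1) : shift y by 1
              intro x hx y hy
              have := hA x (by omega) (y+1) (by omega)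
              have e1 : i + 1 + 1 - (t+2) + x = i + 1 - (t+1) + x := by omega
              have e2 : j + 1 + 1 - (t+2) + (y+1) = j + 1 + 1 - (t+1) + y := by omega
              rw [e1, e2] at this; exact this
            · intro x hx y hy
              have := hA (x+1) (by omega) y (by omega)
              have e1 : i + 1 + 1 - (t+2) + (x+1) = i + 1 + 1 - (t+1) + x := by omega
              have e2 : j + 1 + 1 - (t+2) + y = j + 1 - (t+1) + y := by omega
              rw [e1, e2] at this; exact this
            · intro x hx y hy
              have := hA x (by omega) y (by omega)
              have e1 : i + 1 + 1 - (t+2) + x = i + 1 - (t+1) + x := by omega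
              have e2 : j + 1 + 1 - (t+2) + y = j + 1 - (t+1) + y := by omega
              rw [e1, e2] at this; exact this
      · have hd : dP P (i+1) (j+1) = 0 := by simp [dP, h]
        rw [hd]
        constructor
        · intro h1; omega
        · rintro ⟨h1, h2, hA⟩
          have := hA (s-1) (by omega) (s-1) (by omega)
          have e1 : i + 1 + 1 - s + (s-1) = i + 1 := by omega
          have e2 : j + 1 + 1 - s + (s-1) = j + 1 := by omega
          rw [e1, e2] at this
          simp [this] at h

lemma dP_ge_iff (P : List (List String)) (i j s : Nat) (hs : 1 ≤ s) :
    s ≤ dP P i j ↔ s ≤ i + 1 ∧ s ≤ j + 1 ∧ allEmpP P (i + 1 - s) (j + 1 - s) s :=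
  dP_ge_iff_aux P (i + j) i j s rfl hs

-- ---- final-selection step: first element ≤ M of the descending sort = max of the filtered list ----

lemma foldl_max_of_le (l : List Int) (a : Int) (h : ∀ y ∈ l, y ≤ a) : l.foldl max a = a := by
  refine le_antisymm ?_ (PySem.List.le_foldl_max l a).1
  rcases PySem.List.foldl_max_mem l a with heq | hm
  · exact le_of_eq heq
  · exact h _ hm

lemma maxFilter_perm (M : Int) {l1 l2 : List Int} (h : l1.Perm l2) :
    maxFilter M l1 = maxFilter M l2 := by
  have hp : (l1.filter (fun m => decide (m ≤ M))).Perm (l2.filter (fun m => decide (m ≤ M))) :=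
    h.filter _
  unfold maxFilter
  rcases hf1 : l1.filter (fun m => decide (m ≤ M)) with _ | ⟨h1, t1⟩ <;>
    rcases hf2 : l2.filter (fun m => decide (m ≤ M)) with _ | ⟨h2, t2⟩ <;>
      rw [hf1, hf2] at hp
  · have := hp.length_eq; simp at this
  · have := hp.length_eq; simp at this
  · have m1 : t1.foldl max h1 ∈ h1 :: t1 := by
      rcases PySem.List.foldl_max_mem t1 h1 with he | hm
      · rw [he]; exact List.mem_cons_self
      · exact List.mem_cons_of_mem _ hm
    have m2 : t2.foldl max h2 ∈ h2 :: t2 := by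
      rcases PySem.List.foldl_max_mem t2 h2 with he | hm
      · rw [he]; exact List.mem_cons_self
      · exact List.mem_cons_of_mem _ hm
    have ub1 : ∀ y ∈ h1 :: t1, y ≤ t1.foldl max h1 := by
      intro y hy
      rcases List.mem_cons.mp hy with he | hm
      · rw [he]; exact (PySem.List.le_foldl_max t1 h1).1
      · exact (PySem.List.le_foldl_max t1 h1).2 _ hm
    have ub2 : ∀ y ∈ h2 :: t2, y ≤ t2.foldl max h2 := by
      intro y hy
      rcases List.mem_cons.mp hy with he | hm
      · rw [he]; exact (PySem.List.le_foldl_max t2 h2).1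
      · exact (PySem.List.le_foldl_max t2 h2).2 _ hm
    exact le_antisymm (ub2 _ (hp.mem_iff.mp m1)) (ub1 _ (hp.mem_iff.mpr m2))

lemma firstLEA_pairwise (M : Int) :
    ∀ l : List Int, l.Pairwise (fun a b => b ≤ a) → firstLEA l M = maxFilter M l := by
  intro l
  induction l with
  | nil => intro _; rfl
  | cons h t ih =>
    intro hp
    rcases List.pairwise_cons.mp hp with ⟨hh, ht⟩
    by_cases hM : h ≤ M
    · have : firstLEA (h :: t) M = h := by simp [firstLEA, hM]
      rw [this]
      unfold maxFilter
      rw [List.filter_cons_of_pos (by simpa using hM)]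
      exact (foldl_max_of_le _ _ (fun y hy => hh y (List.mem_of_mem_filter hy))).symm
    · have : firstLEA (h :: t) M = firstLEA t M := by simp [firstLEA, hM]
      rw [this, ih ht]
      unfold maxFilter
      rw [List.filter_cons_of_neg (by simpa using hM)]

lemma firstLEA_sorted (mats : List Int) (M : Int) :
    firstLEA (PySem.List.sorted mats (fun x => x) true) M = maxFilter M mats := by
  rw [firstLEA_pairwise M _ (PySem.List.sorted_pairwise_rev mats (fun x => x))]
  exact maxFilter_perm M (PySem.List.sorted_perm mats (fun x => x) true)

-- ---- A-side: the dp fold computes dP and the running max msAt ----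

def stepF (P : List (List String)) (i : Int) (st : List (List Int) × Int) (j : Int) :
    List (List Int) × Int :=
  let board : List (List Int) :=
    P.map (fun row => row.map (fun x => if x == "-1" then (1 : Int) else 0))
  let dp := st.1
  let ms := st.2
  if ((board.getD i.toNat []).getD j.toNat 0) == 1 then
    let v : Int :=
      if i == 0 || j == 0 then 1
      else min (min ((dp.getD (i - 1).toNat []).getD j.toNat 0)
                   ((dp.getD i.toNat []).getD (j - 1).toNat 0))
               ((dp.getD (i - 1).toNat []).getD (j - 1).toNat 0) + 1
    (dp.set i.toNat ((dp.getD i.toNat []).set j.toNat v), max ms v)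
  else st

-- helper list lemmas
lemma set_map_range {α : Type} (n k : Nat) (f : Nat → α) (v : α) (_hk : k < n) :
    ((List.range n).map f).set k v = (List.range n).map (fun m => if m = k then v else f m) := by
  apply List.ext_getElem
  · simp
  · intro m h1 h2
    simp only [List.getElem_set, List.getElem_map, List.getElem_range]
    split
    · simp_all
    · have : ¬ (m = k) := by omega
      simp [this]

lemma getD_map_strrow (row : List String) (j : Nat) :
    (row.map (fun x => if x == "-1" then (1 : Int) else 0)).getD j 0
      = if (row.getD j "") == "-1" then (1 : Int) else 0 := by
  rcases h : row[j]? with _ | x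
  · have hlen : row.length ≤ j := by simpa using List.getElem?_eq_none_iff.mp h
    rw [List.getD_eq_getElem?_getD, List.getD_eq_getElem?_getD]
    simp [List.getElem?_map, h]
  · rw [List.getD_eq_getElem?_getD, List.getD_eq_getElem?_getD]
    simp [List.getElem?_map, h]

lemma boardEntry (P : List (List String)) (i j : Nat) :
    (((P.map (fun row => row.map (fun x => if x == "-1" then (1 : Int) else 0))).getD i []).getD j 0)
      = if empP P i j then (1 : Int) else 0 := by
  unfold empP
  have h1 : (P.map (fun row => row.map (fun x => if x == "-1" then (1 : Int) else 0))).getD i []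
      = (P.getD i []).map (fun x => if x == "-1" then (1 : Int) else 0) := by
    simp only [List.getD_eq_getElem?_getD, List.getElem?_map]
    cases P[i]? <;> simp
  rw [h1]
  exact getD_map_strrow _ j

lemma dpAt_get (P : List (List String)) (R C i j r c : Nat) (hr : r < R) (hc : c < C) :
    (((dpAt P R C i j).getD r []).getD c 0)
      = if r < i ∨ (r = i ∧ c < j) then (dP P r c : Int) else 0 := by
  unfold dpAt
  rw [PySem.List.getD_map_range _ _ _ _ hr, PySem.List.getD_map_range _ _ _ _ hc]

lemma dpAt_set (P : List (List String)) (R C i j : Nat) (hi : i < R) (hj : j < C) :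
    (dpAt P R C i j).set i (((dpAt P R C i j).getD i []).set j ((dP P i j : Nat) : Int))
      = dpAt P R C i (j+1) := by
  unfold dpAt
  rw [PySem.List.getD_map_range _ _ _ _ hi]
  rw [set_map_range _ _ _ _ hj, set_map_range _ _ _ _ hi]
  apply List.map_congr_left
  intro r _
  by_cases hri : r = i
  · rw [hri, if_pos rfl]
    apply List.map_congr_left
    intro c _
    by_cases hcj : c = j
    · rw [hcj, if_pos rfl, if_pos (show i < i ∨ (i = i ∧ j < j + 1) by omega)]
    · rw [if_neg hcj]
      by_cases h2 : c < j
      · rw [if_pos (show i < i ∨ (i = i ∧ c < j) by omega),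
            if_pos (show i < i ∨ (i = i ∧ c < j + 1) by omega)]
      · rw [if_neg (show ¬(i < i ∨ (i = i ∧ c < j)) by omega),
            if_neg (show ¬(i < i ∨ (i = i ∧ c < j + 1)) by omega)]
  · rw [if_neg hri]
    apply List.map_congr_left
    intro c _
    by_cases h2 : r < i
    · rw [if_pos (Or.inl h2), if_pos (Or.inl h2)]
    · rw [if_neg (show ¬(r < i ∨ (r = i ∧ c < j)) by omega),
          if_neg (show ¬(r < i ∨ (r = i ∧ c < j + 1)) by omega)]

lemma dpAt_stall (P : List (List String)) (R C i j : Nat) (hd : dP P i j = 0) :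
    dpAt P R C i (j+1) = dpAt P R C i j := by
  unfold dpAt
  apply List.map_congr_left
  intro r _
  apply List.map_congr_left
  intro c _
  by_cases h1 : r < i
  · rw [if_pos (Or.inl h1), if_pos (Or.inl h1)]
  · by_cases h2 : r = i
    · by_cases h3 : c < j
      · rw [if_pos (show r < i ∨ (r = i ∧ c < j + 1) by omega),
            if_pos (show r < i ∨ (r = i ∧ c < j) by omega)]
      · by_cases h4 : c = j
        · rw [if_pos (show r < i ∨ (r = i ∧ c < j + 1) by omega),
              if_neg (show ¬(r < i ∨ (r = i ∧ c < j)) by omega)]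
          rw [h2, h4, hd]
          simp
        · rw [if_neg (show ¬(r < i ∨ (r = i ∧ c < j + 1)) by omega),
              if_neg (show ¬(r < i ∨ (r = i ∧ c < j)) by omega)]
    · rw [if_neg (show ¬(r < i ∨ (r = i ∧ c < j + 1)) by omega),
          if_neg (show ¬(r < i ∨ (r = i ∧ c < j)) by omega)]

lemma msAt_nonneg (P : List (List String)) (C i k : Nat) : 0 ≤ msAt P C i k :=
  (PySem.List.le_foldl_max_int _ _ 0).1

lemma msAt_succ (P : List (List String)) (C i k : Nat) :
    msAt P C i (k+1) = max (msAt P C i k) ((dP P i k : Nat) : Int) := by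
  unfold msAt cb
  rw [List.range_succ, List.map_append, ← List.append_assoc, List.foldl_append]
  rfl

lemma msAt_roll (P : List (List String)) (C i : Nat) :
    msAt P C (i+1) 0 = msAt P C i C := by
  unfold msAt cb
  simp [List.range_succ]

lemma stepF_eq (P : List (List String)) (R C i j : Nat) (hi : i < R) (hj : j < C) (ms : Int)
    (hms : 0 ≤ ms) :
    stepF P (i : Int) (dpAt P R C i j, ms) (j : Int)
      = (dpAt P R C i (j+1), max ms ((dP P i j : Nat) : Int)) := by
  unfold stepF
  simp only [Int.toNat_natCast]
  rw [boardEntry]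
  by_cases h : empP P i j
  · have hcond : ((if empP P i j then (1:Int) else 0) == 1) = true := by simp [h]
    rw [hcond, if_pos rfl]
    by_cases h0 : i = 0 ∨ j = 0
    · have hb : ((i : Int) == 0 || (j : Int) == 0) = true := by
        rcases h0 with h0 | h0 <;> subst h0 <;> simp
      rw [hb]
      simp only [if_true]
      have hd : dP P i j = 1 := by rw [dP_eq, if_pos h, if_pos h0]
      have h5 := dpAt_set P R C i j hi hj
      rw [hd] at h5
      simp only [Nat.cast_one] at h5
      rw [h5, hd]
      norm_num
    · rw [not_or] at h0
      have hb : ((i : Int) == 0 || (j : Int) == 0) = false := by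
        simp [h0.1, h0.2]
      rw [hb]
      simp only [Bool.false_eq_true, if_false]
      have e1 : ((i : Int) - 1).toNat = i - 1 := by omega
      have e2 : ((j : Int) - 1).toNat = j - 1 := by omega
      rw [e1, e2]
      rw [dpAt_get P R C i j (i-1) j (by omega) hj,
          dpAt_get P R C i j i (j-1) hi (by omega),
          dpAt_get P R C i j (i-1) (j-1) (by omega) (by omega)]
      have c1 : ((i-1 < i ∨ (i-1 = i ∧ j < j)) : Prop) := by omega
      have c2 : ((i < i ∨ (i = i ∧ j-1 < j)) : Prop) := by omega
      have c3 : ((i-1 < i ∨ (i-1 = i ∧ j-1 < j)) : Prop) := by omega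
      rw [if_pos c1, if_pos c2, if_pos c3]
      have hv : min (min ((dP P (i-1) j : Nat) : Int) ((dP P i (j-1) : Nat) : Int))
            ((dP P (i-1) (j-1) : Nat) : Int) + 1 = ((dP P i j : Nat) : Int) := by
        rw [dP_eq P i j, if_pos h, if_neg (by omega)]
        push_cast [Nat.cast_min]
        ring
      rw [hv, dpAt_set P R C i j hi hj]
  · have hcond : ((if empP P i j then (1:Int) else 0) == 1) = false := by simp [h]
    rw [hcond]
    simp only [Bool.false_eq_true, if_false]
    have hd : dP P i j = 0 := by rw [dP_eq, if_neg (by simp [h])]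
    rw [dpAt_stall P R C i j hd, hd]
    simp [hms]


lemma innerF (P : List (List String)) (R C i : Nat) (hi : i < R) :
    ∀ k, k ≤ C →
      ((List.range k).map (fun n : Nat => (n : Int))).foldl (stepF P (i : Int))
          (dpAt P R C i 0, msAt P C i 0)
        = (dpAt P R C i k, msAt P C i k) := by
  intro k
  induction k with
  | zero => intro _; rfl
  | succ k ih =>
    intro hk
    rw [List.range_succ, List.map_append, List.foldl_append, ih (by omega)]
    simp only [List.map_cons, List.map_nil, List.foldl_cons, List.foldl_nil]
    rw [stepF_eq P R C i k hi (by omega) _ (msAt_nonneg P C i k), msAt_succ]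

lemma outerF (P : List (List String)) (R C : Nat) :
    ∀ m, m ≤ R →
      ((List.range m).map (fun n : Nat => (n : Int))).foldl
          (fun st i => ((List.range C).map (fun n : Nat => (n : Int))).foldl (stepF P i) st)
          (dpAt P R C 0 0, msAt P C 0 0)
        = (dpAt P R C m 0, msAt P C m 0) := by
  intro m
  induction m with
  | zero => intro _; rfl
  | succ m ih =>
    intro hm
    rw [List.range_succ, List.map_append, List.foldl_append, ih (by omega)]
    simp only [List.map_cons, List.map_nil, List.foldl_cons, List.foldl_nil]
    rw [innerF P R C m (by omega) C (le_refl C)]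
    have hdp : dpAt P R C m C = dpAt P R C (m+1) 0 := by
      unfold dpAt
      apply List.map_congr_left
      intro r _
      apply List.map_congr_left
      intro c hc
      have hcC : c < C := List.mem_range.mp hc
      by_cases h1 : r < m
      · rw [if_pos (Or.inl h1), if_pos (show r < m + 1 ∨ (r = m + 1 ∧ c < 0) by omega)]
      · by_cases h2 : r = m
        · rw [if_pos (show r < m ∨ (r = m ∧ c < C) by omega),
              if_pos (show r < m + 1 ∨ (r = m + 1 ∧ c < 0) by omega)]
        · rw [if_neg (show ¬(r < m ∨ (r = m ∧ c < C)) by omega),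
              if_neg (show ¬(r < m + 1 ∨ (r = m + 1 ∧ c < 0)) by omega)]
    rw [hdp, msAt_roll]

lemma dpAt_zero (P : List (List String)) (R C : Nat) :
    dpAt P R C 0 0 = List.replicate R (List.replicate C (0 : Int)) := by
  unfold dpAt
  have h1 : ∀ r : Nat, ((List.range C).map fun c =>
      if r < 0 ∨ (r = 0 ∧ c < 0) then ((dP P r c : Nat) : Int) else 0)
      = List.replicate C (0 : Int) := by
    intro r
    have : ∀ c ∈ List.range C, (if r < 0 ∨ (r = 0 ∧ c < 0) then ((dP P r c : Nat) : Int) else 0)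
        = (fun _ => (0 : Int)) c := by
      intro c _
      rw [if_neg (by omega)]
    rw [List.map_congr_left this, List.map_const', List.length_range]
  have : ∀ r ∈ List.range R, ((List.range C).map fun c =>
      if r < 0 ∨ (r = 0 ∧ c < 0) then ((dP P r c : Nat) : Int) else 0)
      = (fun _ => List.replicate C (0 : Int)) r := by
    intro r _
    exact h1 r
  rw [List.map_congr_left this, List.map_const', List.length_range]

lemma headD_map (P : List (List String)) (f : List String → List Int) (h : f [] = []) :
    (P.map f).headD [] = f (P.headD []) := by
  cases P <;> simp [h]

lemma solution_eq (mats : List Int) (park : List (List String)) :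
    solution mats park
      = firstLEA (PySem.List.sorted mats (fun x => x) true)
          (msAt park (park.headD []).length park.length 0) := by
  have hrfl : solution mats park
      = firstLEA (PySem.List.sorted mats (fun x => x) true)
          (((PySem.List.pyRange 0
              ((park.map (fun row => row.map (fun x => if x == "-1" then (1 : Int) else 0))).length : Int) 1).foldl
            (fun st i =>
              (PySem.List.pyRange 0
                (((park.map (fun row => row.map (fun x => if x == "-1" then (1 : Int) else 0))).headD []).length : Int) 1).foldl
                (stepF park i) st)
            (List.replicate
              ((park.map (fun row => row.map (fun x => if x == "-1" then (1 : Int) else 0))).length : Int).toNat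
              (List.replicate
                ((((park.map (fun row => row.map (fun x => if x == "-1" then (1 : Int) else 0))).headD []).length : Int)).toNat
                (0 : Int)) , (0 : Int))).2) := rfl
  rw [hrfl]
  rw [headD_map park _ rfl, List.length_map, List.length_map]
  rw [PySem.List.pyRange_zero_natCast, PySem.List.pyRange_zero_natCast]
  rw [Int.toNat_natCast, Int.toNat_natCast]
  rw [← dpAt_zero park park.length (park.headD []).length]
  have hms0 : (0 : Int) = msAt park (park.headD []).length 0 0 := rfl
  rw [hms0]
  rw [outerF park park.length (park.headD []).length park.length (le_refl _)]

-- ---- B-side: the descending window scan finds the same maximum ----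

lemma foldl_max_attain {α : Type} (l : List α) (f : α → Int) (a : Int) :
    l.foldl (fun acc x => max acc (f x)) a = a ∨
      ∃ x ∈ l, l.foldl (fun acc x => max acc (f x)) a = f x := by
  induction l generalizing a with
  | nil => exact Or.inl rfl
  | cons h t ih =>
    simp only [List.foldl_cons]
    rcases ih (max a (f h)) with he | ⟨x, hx, he⟩
    · rcases max_choice a (f h) with hm | hm
      · exact Or.inl (by rw [he, hm])
      · exact Or.inr ⟨h, List.mem_cons_self, by rw [he, hm]⟩
    · exact Or.inr ⟨x, List.mem_cons_of_mem _ hx, he⟩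

lemma mem_cb (C R i j : Nat) : (i, j) ∈ cb C R 0 ↔ i < R ∧ j < C := by
  simp [cb, List.mem_flatMap, List.mem_range, List.mem_map]

-- counting model for the prefix-sum table
def cellN (P : List (List String)) (i j : Nat) : Nat := if empP P i j then 1 else 0

def rowPN (P : List (List String)) (r c : Nat) : Nat :=
  ((List.range c).map (fun y => cellN P r y)).sum

def cntN (P : List (List String)) (m c : Nat) : Nat :=
  ((List.range m).map (fun r => rowPN P r c)).sum

def wcntN (P : List (List String)) (a b s : Nat) : Nat :=
  ((List.range s).map (fun x => ((List.range s).map (fun y => cellN P (a + x) (b + y))).sum)).sum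

-- the state of B's prefix table after the cells before (i,j) (row-major) are processed
def preAt (P : List (List String)) (R C i j : Nat) : List (List Int) :=
  (List.range (R + 1)).map fun r => (List.range (C + 1)).map fun c =>
    if 1 ≤ r ∧ 1 ≤ c ∧ (r - 1 < i ∨ (r - 1 = i ∧ c - 1 < j)) then (cntN P r c : Int) else 0

-- B's inner loop body
def stepG (P : List (List String)) (i : Int) (t : List (List Int)) (j : Int) :
    List (List Int) :=
  t.set (i + 1).toNat ((t.getD (i + 1).toNat []).set (j + 1).toNat
    ((t.getD (i + 1).toNat []).getD j.toNat 0
      + (t.getD i.toNat []).getD (j + 1).toNat 0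
      - (t.getD i.toNat []).getD j.toNat 0
      + (if (P.getD i.toNat []).getD j.toNat "" == "-1" then (1 : Int) else 0)))

lemma rowPN_succ (P : List (List String)) (r c : Nat) :
    rowPN P r (c + 1) = rowPN P r c + cellN P r c := by
  simp [rowPN, List.range_succ]

lemma cntN_succ (P : List (List String)) (m c : Nat) :
    cntN P (m + 1) c = cntN P m c + rowPN P m c := by
  simp [cntN, List.range_succ]

lemma cntN_zero_row (P : List (List String)) (c : Nat) : cntN P 0 c = 0 := rfl

lemma cntN_zero_col (P : List (List String)) (m : Nat) : cntN P m 0 = 0 := by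
  simp [cntN, rowPN]

lemma cntN_identity (P : List (List String)) (i j : Nat) :
    ((cntN P (i + 1) (j + 1) : Nat) : Int)
      = (cntN P (i + 1) j : Nat) + (cntN P i (j + 1) : Nat) - (cntN P i j : Nat)
        + (cellN P i j : Nat) := by
  rw [cntN_succ P i (j + 1), cntN_succ P i j, rowPN_succ P i j]
  push_cast
  ring

lemma sum_map_add_nat (n : Nat) (f g : Nat → Nat) :
    ((List.range n).map (fun x => f x + g x)).sum
      = ((List.range n).map f).sum + ((List.range n).map g).sum := by
  induction n with
  | zero => rfl
  | succ n ih => simp [List.range_succ, ih]; omega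

lemma cntN_split (P : List (List String)) (a s c : Nat) :
    cntN P (a + s) c = cntN P a c + ((List.range s).map (fun x => rowPN P (a + x) c)).sum := by
  induction s with
  | zero => simp
  | succ s ih =>
    have e : a + (s + 1) = (a + s) + 1 := by omega
    rw [e, cntN_succ, ih]
    simp [List.range_succ]
    omega

lemma rowPN_split (P : List (List String)) (r b t : Nat) :
    rowPN P r (b + t) = rowPN P r b + ((List.range t).map (fun y => cellN P r (b + y))).sum := by
  induction t with
  | zero => simp
  | succ t ih =>
    have e : b + (t + 1) = (b + t) + 1 := by omega
    rw [e, rowPN_succ, ih]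
    simp [List.range_succ]
    omega

lemma window_formula (P : List (List String)) (a b s : Nat) :
    ((cntN P (a + s) (b + s) : Nat) : Int) - (cntN P (a + s) b : Nat)
        - (cntN P a (b + s) : Nat) + (cntN P a b : Nat)
      = ((wcntN P a b s : Nat) : Int) := by
  have h1 : cntN P (a + s) (b + s)
      = cntN P a (b + s) + ((List.range s).map (fun x => rowPN P (a + x) (b + s))).sum :=
    cntN_split P a s (b + s)
  have h2 : cntN P (a + s) b
      = cntN P a b + ((List.range s).map (fun x => rowPN P (a + x) b)).sum :=
    cntN_split P a s b
  have h3 : ((List.range s).map (fun x => rowPN P (a + x) (b + s))).sum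
      = ((List.range s).map (fun x => rowPN P (a + x) b)).sum + wcntN P a b s := by
    unfold wcntN
    rw [← sum_map_add_nat s (fun x => rowPN P (a + x) b)
        (fun x => ((List.range s).map (fun y => cellN P (a + x) (b + y))).sum)]
    apply congrArg
    apply List.map_congr_left
    intro x _
    exact rowPN_split P (a + x) b s
  rw [h1, h2, h3]
  push_cast
  ring

lemma sum_range_le_c (n c : Nat) (f : Nat → Nat) (h : ∀ x, x < n → f x ≤ c) :
    ((List.range n).map f).sum ≤ n * c := by
  induction n with
  | zero => simp
  | succ n ih =>
    rw [List.range_succ]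
    simp only [List.map_append, List.sum_append, List.map_cons, List.sum_cons, List.map_nil,
      List.sum_nil]
    have h1 := ih (fun x hx => h x (by omega))
    have h2 := h n (by omega)
    have e : (n + 1) * c = n * c + c := by ring
    omega

lemma sum_range_eq_c_iff (n c : Nat) (f : Nat → Nat) (h : ∀ x, x < n → f x ≤ c) :
    ((List.range n).map f).sum = n * c ↔ ∀ x, x < n → f x = c := by
  induction n with
  | zero => simp
  | succ n ih =>
    rw [List.range_succ]
    simp only [List.map_append, List.sum_append, List.map_cons, List.sum_cons, List.map_nil,
      List.sum_nil]
    have h1 := sum_range_le_c n c f (fun x hx => h x (by omega))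
    have h2 := h n (by omega)
    have e : (n + 1) * c = n * c + c := by ring
    constructor
    · intro heq
      have hs : ((List.range n).map f).sum = n * c ∧ f n = c := by omega
      intro x hx
      by_cases hxn : x = n
      · rw [hxn]; exact hs.2
      · exact (ih (fun x hx => h x (by omega))).mp hs.1 x (by omega)
    · intro hall
      have hs : ((List.range n).map f).sum = n * c :=
        (ih (fun x hx => h x (by omega))).mpr (fun x hx => hall x (by omega))
      have hn : f n = c := hall n (by omega)
      omega

lemma cellN_le_one (P : List (List String)) (i j : Nat) : cellN P i j ≤ 1 := by
  unfold cellN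
  split <;> omega

lemma wcnt_eq_iff (P : List (List String)) (a b s : Nat) :
    wcntN P a b s = s * s ↔ allEmpP P a b s := by
  unfold wcntN allEmpP
  rw [sum_range_eq_c_iff s s _ (fun x _ => by
    have := sum_range_le_c s 1 (fun y => cellN P (a + x) (b + y))
      (fun y _ => cellN_le_one P (a + x) (b + y))
    omega)]
  constructor
  · intro h x hx y hy
    have hrow := h x hx
    have h1 := (sum_range_eq_c_iff s 1 (fun y => cellN P (a + x) (b + y))
      (fun y _ => cellN_le_one P (a + x) (b + y))).mp (by omega) y hy
    unfold cellN at h1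
    by_cases he : empP P (a + x) (b + y) = true
    · exact he
    · simp [he] at h1
  · intro h x hx
    have h1 : ((List.range s).map (fun y => cellN P (a + x) (b + y))).sum = s * 1 :=
      (sum_range_eq_c_iff s 1 (fun y => cellN P (a + x) (b + y))
        (fun y _ => cellN_le_one P (a + x) (b + y))).mpr (fun y hy => by
          unfold cellN
          rw [if_pos (h x hx y hy)])
    omega

lemma preAt_entry (P : List (List String)) (R C i j r c : Nat) (hr : r < R + 1)
    (hc : c < C + 1) (hdet : r ≤ i ∨ (r = i + 1 ∧ c ≤ j)) :
    ((preAt P R C i j).getD r []).getD c 0 = ((cntN P r c : Nat) : Int) := by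
  unfold preAt
  rw [PySem.List.getD_map_range _ _ _ _ hr, PySem.List.getD_map_range _ _ _ _ hc]
  by_cases h1 : 1 ≤ r ∧ 1 ≤ c ∧ (r - 1 < i ∨ (r - 1 = i ∧ c - 1 < j))
  · rw [if_pos h1]
  · rw [if_neg h1]
    have h2 : r = 0 ∨ c = 0 := by omega
    rcases h2 with h2 | h2 <;> rw [h2]
    · rw [cntN_zero_row]; simp
    · rw [cntN_zero_col]; simp

lemma stepG_eq (P : List (List String)) (R C i j : Nat) (hi : i < R) (hj : j < C) :
    stepG P (i : Int) (preAt P R C i j) (j : Int) = preAt P R C i (j + 1) := by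
  unfold stepG
  simp only [Int.toNat_natCast]
  rw [show ((i : Int) + 1).toNat = i + 1 by omega, show ((j : Int) + 1).toNat = j + 1 by omega]
  rw [preAt_entry P R C i j (i + 1) j (by omega) (by omega) (Or.inr ⟨rfl, le_refl j⟩),
      preAt_entry P R C i j i (j + 1) (by omega) (by omega) (Or.inl (le_refl i)),
      preAt_entry P R C i j i j (by omega) (by omega) (Or.inl (le_refl i))]
  have hrow : (preAt P R C i j).getD (i + 1) []
      = (List.range (C + 1)).map fun c =>
          if 1 ≤ i + 1 ∧ 1 ≤ c ∧ (i + 1 - 1 < i ∨ (i + 1 - 1 = i ∧ c - 1 < j)) then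
            (cntN P (i + 1) c : Int) else 0 := by
    unfold preAt
    rw [PySem.List.getD_map_range _ _ _ _ (by omega : i + 1 < R + 1)]
  rw [hrow]
  unfold preAt
  rw [set_map_range _ _ _ _ (by omega : j + 1 < C + 1),
      set_map_range _ _ _ _ (by omega : i + 1 < R + 1)]
  apply List.map_congr_left
  intro r _
  by_cases hri : r = i + 1
  · rw [hri, if_pos rfl]
    apply List.map_congr_left
    intro c _
    by_cases hcj : c = j + 1
    · rw [hcj, if_pos rfl,
          if_pos (show 1 ≤ i + 1 ∧ 1 ≤ j + 1 ∧
            (i + 1 - 1 < i ∨ (i + 1 - 1 = i ∧ j + 1 - 1 < j + 1)) from by omega)]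
      have hid := cntN_identity P i j
      by_cases hb : ((P.getD i []).getD j "" == "-1") = true
      · rw [if_pos hb]
        have hc1 : cellN P i j = 1 := by unfold cellN empP; rw [if_pos hb]
        rw [hc1] at hid
        push_cast at hid ⊢
        omega
      · rw [if_neg hb]
        have hc0 : cellN P i j = 0 := by unfold cellN empP; rw [if_neg hb]
        rw [hc0] at hid
        push_cast at hid ⊢
        omega
    · rw [if_neg hcj]
      by_cases h2 : 1 ≤ c ∧ c - 1 < j
      · rw [if_pos (show 1 ≤ i + 1 ∧ 1 ≤ c ∧
              (i + 1 - 1 < i ∨ (i + 1 - 1 = i ∧ c - 1 < j)) from by omega),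
            if_pos (show 1 ≤ i + 1 ∧ 1 ≤ c ∧
              (i + 1 - 1 < i ∨ (i + 1 - 1 = i ∧ c - 1 < j + 1)) from by omega)]
      · rw [if_neg (show ¬(1 ≤ i + 1 ∧ 1 ≤ c ∧
              (i + 1 - 1 < i ∨ (i + 1 - 1 = i ∧ c - 1 < j))) from by omega),
            if_neg (show ¬(1 ≤ i + 1 ∧ 1 ≤ c ∧
              (i + 1 - 1 < i ∨ (i + 1 - 1 = i ∧ c - 1 < j + 1))) from by omega)]
  · rw [if_neg hri]
    apply List.map_congr_left
    intro c _
    by_cases h2 : 1 ≤ r ∧ 1 ≤ c ∧ (r - 1 < i ∨ (r - 1 = i ∧ c - 1 < j))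
    · rw [if_pos h2,
          if_pos (show 1 ≤ r ∧ 1 ≤ c ∧
            (r - 1 < i ∨ (r - 1 = i ∧ c - 1 < j + 1)) from by omega)]
    · rw [if_neg h2,
          if_neg (show ¬(1 ≤ r ∧ 1 ≤ c ∧
            (r - 1 < i ∨ (r - 1 = i ∧ c - 1 < j + 1))) from by omega)]

lemma innerG (P : List (List String)) (R C i : Nat) (hi : i < R) :
    ∀ k, k ≤ C →
      ((List.range k).map (fun n : Nat => (n : Int))).foldl (stepG P (i : Int))
          (preAt P R C i 0)
        = preAt P R C i k := by
  intro k
  induction k with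
  | zero => intro _; rfl
  | succ k ih =>
    intro hk
    rw [List.range_succ, List.map_append, List.foldl_append, ih (by omega)]
    simp only [List.map_cons, List.map_nil, List.foldl_cons, List.foldl_nil]
    exact stepG_eq P R C i k hi (by omega)

lemma preAt_roll (P : List (List String)) (R C m : Nat) :
    preAt P R C m C = preAt P R C (m + 1) 0 := by
  unfold preAt
  apply List.map_congr_left
  intro r _
  apply List.map_congr_left
  intro c hc
  have hcC : c < C + 1 := List.mem_range.mp hc
  by_cases h1 : 1 ≤ r ∧ 1 ≤ c ∧ (r - 1 < m ∨ (r - 1 = m ∧ c - 1 < C))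
  · rw [if_pos h1, if_pos (by omega)]
  · rw [if_neg h1, if_neg (by omega)]

lemma outerG (P : List (List String)) (R C : Nat) :
    ∀ m, m ≤ R →
      ((List.range m).map (fun n : Nat => (n : Int))).foldl
          (fun t i => ((List.range C).map (fun n : Nat => (n : Int))).foldl (stepG P i) t)
          (preAt P R C 0 0)
        = preAt P R C m 0 := by
  intro m
  induction m with
  | zero => intro _; rfl
  | succ m ih =>
    intro hm
    rw [List.range_succ, List.map_append, List.foldl_append, ih (by omega)]
    simp only [List.map_cons, List.map_nil, List.foldl_cons, List.foldl_nil]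
    rw [innerG P R C m (by omega) C (le_refl C), preAt_roll]

lemma preAt_zero (P : List (List String)) (R C : Nat) :
    preAt P R C 0 0 = List.replicate (R + 1) (List.replicate (C + 1) (0 : Int)) := by
  unfold preAt
  have h1 : ∀ r : Nat, ((List.range (C + 1)).map fun c =>
      if 1 ≤ r ∧ 1 ≤ c ∧ (r - 1 < 0 ∨ (r - 1 = 0 ∧ c - 1 < 0)) then (cntN P r c : Int) else 0)
      = List.replicate (C + 1) (0 : Int) := by
    intro r
    have h2 : ∀ c ∈ List.range (C + 1),
        (if 1 ≤ r ∧ 1 ≤ c ∧ (r - 1 < 0 ∨ (r - 1 = 0 ∧ c - 1 < 0)) then (cntN P r c : Int) else 0)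
        = (fun _ => (0 : Int)) c := by
      intro c _
      rw [if_neg (by omega)]
    rw [List.map_congr_left h2, List.map_const', List.length_range]
  have h3 : ∀ r ∈ List.range (R + 1), ((List.range (C + 1)).map fun c =>
      if 1 ≤ r ∧ 1 ≤ c ∧ (r - 1 < 0 ∨ (r - 1 = 0 ∧ c - 1 < 0)) then (cntN P r c : Int) else 0)
      = (fun _ => List.replicate (C + 1) (0 : Int)) r := fun r _ => h1 r
  rw [List.map_congr_left h3, List.map_const', List.length_range]

lemma feasibleB_iff (P : List (List String)) (R C : Nat) (s : Int) (hs : 1 ≤ s) :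
    feasibleB (preAt P R C R 0) (R : Int) (C : Int) s = true
      ↔ ∃ a b : Nat, a + s.toNat ≤ R ∧ b + s.toNat ≤ C ∧ allEmpP P a b s.toNat := by
  unfold feasibleB
  simp only [List.any_eq_true, PySem.List.mem_pyRange_one]
  have hread : ∀ r c : Nat, r ≤ R → c ≤ C →
      (((preAt P R C R 0).getD r []).getD c 0) = ((cntN P r c : Nat) : Int) := by
    intro r c hr hc
    exact preAt_entry P R C R 0 r c (by omega) (by omega) (Or.inl hr)
  constructor
  · rintro ⟨a, ⟨ha0, ha1⟩, b, ⟨hb0, hb1⟩, hw⟩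
    rw [beq_iff_eq] at hw
    refine ⟨a.toNat, b.toNat, by omega, by omega, ?_⟩
    rw [show (a + s).toNat = a.toNat + s.toNat by omega,
        show (b + s).toNat = b.toNat + s.toNat by omega] at hw
    rw [hread (a.toNat + s.toNat) (b.toNat + s.toNat) (by omega) (by omega),
        hread (a.toNat + s.toNat) b.toNat (by omega) (by omega),
        hread a.toNat (b.toNat + s.toNat) (by omega) (by omega),
        hread a.toNat b.toNat (by omega) (by omega)] at hw
    rw [window_formula] at hw
    have hss : s * s = ((s.toNat * s.toNat : Nat) : Int) := by
      have hsn : ((s.toNat : Nat) : Int) = s := by omega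
      rw [Nat.cast_mul, hsn]
    rw [hss] at hw
    have hw' : wcntN P a.toNat b.toNat s.toNat = s.toNat * s.toNat := by exact_mod_cast hw
    exact (wcnt_eq_iff P a.toNat b.toNat s.toNat).mp hw'
  · rintro ⟨a, b, ha, hb, hA⟩
    refine ⟨(a : Int), ⟨by omega, by omega⟩, (b : Int), ⟨by omega, by omega⟩, ?_⟩
    rw [beq_iff_eq]
    rw [show ((a : Int) + s).toNat = a + s.toNat by omega,
        show ((b : Int) + s).toNat = b + s.toNat by omega,
        show ((a : Int)).toNat = a by omega, show ((b : Int)).toNat = b by omega]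
    rw [hread (a + s.toNat) (b + s.toNat) (by omega) (by omega),
        hread (a + s.toNat) b (by omega) (by omega),
        hread a (b + s.toNat) (by omega) (by omega),
        hread a b (by omega) (by omega)]
    rw [window_formula]
    have hw' : wcntN P a b s.toNat = s.toNat * s.toNat := (wcnt_eq_iff P a b s.toNat).mpr hA
    rw [hw']
    have hsn : ((s.toNat : Nat) : Int) = s := by omega
    rw [Nat.cast_mul, hsn]

lemma bsearch_eq (pre : List (List Int)) (rows cols M : Int)
    (hiff : ∀ s : Int, 1 ≤ s → (feasibleB pre rows cols s = true ↔ s ≤ M)) :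
    ∀ lo hi : Int, 0 ≤ lo → lo ≤ M → M ≤ hi → bsearchB pre rows cols lo hi = M := by
  have key : ∀ n : Nat, ∀ lo hi : Int, (hi - lo).toNat = n → 0 ≤ lo → lo ≤ M → M ≤ hi →
      bsearchB pre rows cols lo hi = M := by
    intro n
    induction n using Nat.strong_induction_on with
    | _ n ih =>
    intro lo hi hn h0 h1 h2
    rw [bsearchB]
    by_cases hlt : lo < hi
    · rw [dif_pos hlt]
      have hb := PySem.Int.floordiv_two_mid_bounds (lo := lo + 1) (hi := hi) (by omega)
      have e : lo + 1 + hi = lo + hi + 1 := by omega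
      rw [e] at hb
      set mid := PySem.Int.floordiv (lo + hi + 1) 2 with hmid
      have hm1 : 1 ≤ mid := by omega
      by_cases htest : feasibleB pre rows cols mid = true
      · rw [if_pos htest]
        have hle := (hiff mid hm1).mp htest
        exact ih (hi - mid).toNat (by omega) mid hi rfl (by omega) hle h2
      · rw [if_neg htest]
        have hgt : ¬ (mid ≤ M) := fun hc => htest ((hiff mid hm1).mpr hc)
        exact ih (mid - 1 - lo).toNat (by omega) lo (mid - 1) rfl h0 h1 (by omega)
    · rw [dif_neg hlt]
      omega
  intro lo hi h0 h1 h2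
  exact key (hi - lo).toNat lo hi rfl h0 h1 h2

lemma solution_alt_eq (mats : List Int) (park : List (List String)) :
    solution_alt mats park
      = maxFilter (msAt park (park.headD []).length park.length 0) mats := by
  rw [show solution_alt mats park
      = maxFilter (bsearchB
          ((PySem.List.pyRange 0 (park.length : Int) 1).foldl (fun t i =>
            (PySem.List.pyRange 0 ((park.headD []).length : Int) 1).foldl (stepG park i) t)
            (List.replicate ((park.length : Int) + 1).toNat
              (List.replicate (((park.headD []).length : Int) + 1).toNat (0 : Int))))
          (park.length : Int) ((park.headD []).length : Int)
          0 (min (park.length : Int) ((park.headD []).length : Int)))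
          mats from rfl]
  set R := park.length with hR
  set C := (park.headD []).length with hC
  rw [PySem.List.pyRange_zero_natCast, PySem.List.pyRange_zero_natCast]
  rw [show ((R : Int) + 1).toNat = R + 1 by omega, show ((C : Int) + 1).toNat = C + 1 by omega]
  rw [← preAt_zero park R C]
  rw [outerG park R C R (le_refl R)]
  set M := msAt park C R 0 with hM
  have hM0 : 0 ≤ M := msAt_nonneg park C R 0
  have hub : ∀ i j : Nat, i < R → j < C → ((dP park i j : Nat) : Int) ≤ M := by
    intro i j hi hj
    exact (PySem.List.le_foldl_max_int (cb C R 0) _ 0).2 (i, j) ((mem_cb C R i j).mpr ⟨hi, hj⟩)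
  have hatt : M = 0 ∨ ∃ p ∈ cb C R 0, M = ((dP park p.1 p.2 : Nat) : Int) :=
    foldl_max_attain (cb C R 0) _ 0
  have hMle : M ≤ min (R : Int) (C : Int) := by
    rcases hatt with h0 | ⟨⟨i, j⟩, hmem, heq⟩
    · rw [h0, le_min_iff]
      constructor <;> omega
    · rcases (mem_cb C R i j).mp hmem with ⟨hi, hj⟩
      by_cases hz : dP park i j = 0
      · rw [heq, le_min_iff]
        simp only [hz]
        constructor <;> omega
      · have hge := (dP_ge_iff park i j (dP park i j) (by omega)).mp (le_refl _)
        rw [heq, le_min_iff]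
        constructor <;> (push_cast; omega)
  have hiff : ∀ s : Int, 1 ≤ s →
      (feasibleB (preAt park R C R 0) (R : Int) (C : Int) s = true ↔ s ≤ M) := by
    intro s hs1
    rw [feasibleB_iff park R C s hs1]
    constructor
    · rintro ⟨a, b, ha, hb, hA⟩
      have hsN : 1 ≤ s.toNat := by omega
      have hd : s.toNat ≤ dP park (a + s.toNat - 1) (b + s.toNat - 1) := by
        apply (dP_ge_iff park (a + s.toNat - 1) (b + s.toNat - 1) s.toNat hsN).mpr
        refine ⟨by omega, by omega, ?_⟩
        have e1 : a + s.toNat - 1 + 1 - s.toNat = a := by omega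
        have e2 : b + s.toNat - 1 + 1 - s.toNat = b := by omega
        rw [e1, e2]
        exact hA
      have hbd := hub (a + s.toNat - 1) (b + s.toNat - 1) (by omega) (by omega)
      have : ((s.toNat : Nat) : Int) ≤ ((dP park (a + s.toNat - 1) (b + s.toNat - 1) : Nat) : Int) := by
        exact_mod_cast hd
      omega
    · intro hsM
      rcases hatt with h0 | ⟨⟨i, j⟩, hmem, heq⟩
      · omega
      · rcases (mem_cb C R i j).mp hmem with ⟨hi, hj⟩
        have heq' : M = ((dP park i j : Nat) : Int) := heq
        have hd : s.toNat ≤ dP park i j := by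
          have h2 : ((s.toNat : Nat) : Int) ≤ ((dP park i j : Nat) : Int) := by omega
          exact_mod_cast h2
        have hge := (dP_ge_iff park i j s.toNat (by omega)).mp hd
        exact ⟨i + 1 - s.toNat, j + 1 - s.toNat, by omega, by omega, hge.2.2⟩
  rw [bsearch_eq (preAt park R C R 0) (R : Int) (C : Int) M hiff 0 (min (R : Int) (C : Int))
      (le_refl 0) hM0 hMle]

-- ===== VERDICT (by name: the statement is the Claim_ definition above) =====
theorem solution_spec : Claim_equal_solution := by
  intro mats park _ _
  unfold Spec_solution
  rw [solution_eq, solution_alt_eq, firstLEA_sorted]
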